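-- pv_equiv track=rewrite | github.com/r0831281/AdventOfCode | day0/puzzly.py | find_written_numbers
-- ===== SOURCE A (Python) =====
-- def find_written_numbers(text):
--     # Dictionary mapping written numbers to numeric values
--     word_to_num = {
--         'one': 1, 'two': 2, 'three': 3, 'four': 4, 'five': 5,
--         'six': 6, 'seven': 7, 'eight': 8, 'nine': 9, 'ten': 10
--     }
--
--     # Sort the dictionary by the length of the keys in descending order
--     sorted_word_to_num = dict(sorted(word_to_num.items(), key=lambda x: len(x[0]), reverse=True))
--
--     # Initialize an empty list to store the numeric values
--     numeric_values = []
--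
--     # Iterate over the sorted keys and find matches in the input text
--     for word in sorted_word_to_num.keys():
--         start = 0
--         while True:
--             match_start = text.lower().find(word, start)
--             if match_start == -1:
--                 break
--
--             match_end = match_start + len(word)
--             numeric_values.append((word, sorted_word_to_num[word], match_start, match_end))
--             start = match_end
--
--     # Sort the results based on the starting index of each match
--     numeric_values.sort(key=lambda x: x[2])
--
--     return numeric_values
-- ===== SOURCE B (Python) =====
-- def find_written_numbers(text):
--     word_to_num = {
--         'one': 1, 'two': 2, 'three': 3, 'four': 4, 'five': 5,
--         'six': 6, 'seven': 7, 'eight': 8, 'nine': 9, 'ten': 10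
--     }
--     low = text.lower()
--     matches = []
--     for i in range(len(low)):
--         for word, value in word_to_num.items():
--             if low.startswith(word, i):
--                 matches.append((word, value, i, i + len(word)))
--     # single left-to-right scan: no two words match at the same position
--     # (no word is a prefix of another), so the list is already ordered by start
--     return matches
-- ===== Notes on version B (the rewrite author's own statement) =====
-- stated objective: simpler
-- what changed: Replaces A's ten repeated find-based passes over the text plus a final sort by a single left-to-right scan that tests each number-word at every position of text.lower(), emitting matches already ordered by start index (no word matches at the same position as another, so no sort is needed).
import Mathlib
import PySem

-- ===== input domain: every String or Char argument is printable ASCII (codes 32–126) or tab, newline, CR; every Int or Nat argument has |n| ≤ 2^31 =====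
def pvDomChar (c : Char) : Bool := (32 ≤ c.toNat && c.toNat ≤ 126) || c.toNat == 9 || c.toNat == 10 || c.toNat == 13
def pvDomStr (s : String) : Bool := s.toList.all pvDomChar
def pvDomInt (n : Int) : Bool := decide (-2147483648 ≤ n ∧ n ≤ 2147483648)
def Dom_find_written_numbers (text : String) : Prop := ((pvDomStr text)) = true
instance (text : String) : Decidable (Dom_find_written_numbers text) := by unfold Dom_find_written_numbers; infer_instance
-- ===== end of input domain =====

-- B replaces A's ten find-based passes plus a final sort by one left-to-right scan of
-- the lowered text that tests every number-word at each position (objective: simpler).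

-- ===== PORT A =====
-- the word→value dict literal both Pythons start from (insertion order)
def pvKvs : List (String × Int) :=
  [("one", 1), ("two", 2), ("three", 3), ("four", 4), ("five", 5),
   ("six", 6), ("seven", 7), ("eight", 8), ("nine", 9), ("ten", 10)]

-- A's inner `while True` loop; fuel only makes the recursion structural (the Python
-- loop runs at most len(text)+1 iterations since `start` strictly increases).
def pvFindLoop (text : String) (word : String) (value : Int) :
    Nat → Int → List (String × Int × Int × Int) → List (String × Int × Int × Int)
  | 0, _, acc => acc
  | fuel + 1, start, acc =>
    let match_start := PySem.Str.findFrom (PySem.Str.lower text) word start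
    if match_start = -1 then acc
    else
      let match_end := match_start + PySem.Str.len word
      pvFindLoop text word value fuel match_end (acc ++ [(word, value, match_start, match_end)])

def find_written_numbers (text : String) : List (String × Int × Int × Int) :=
  let word_to_num : PySem.Dict String Int := PySem.Dict.ofList pvKvs
  let sorted_word_to_num : PySem.Dict String Int :=
    PySem.Dict.ofList
      (PySem.List.sorted (PySem.Dict.items word_to_num) (fun x => PySem.Str.len x.1) true)
  let numeric_values :=
    (PySem.Dict.keys sorted_word_to_num).foldl
      (fun acc word =>
        -- sorted_word_to_num[word]: word is drawn from the dict's keys, so the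
        -- lookup always hits (getD's default 0 is never used)
        pvFindLoop text word (PySem.Dict.getD sorted_word_to_num word 0)
          (text.toList.length + 2) 0 acc)
      []
  PySem.List.sorted numeric_values (fun x => x.2.2.1)

-- ===== PORT B =====
def find_written_numbers_alt (text : String) : List (String × Int × Int × Int) :=
  let low := PySem.Str.lower text
  (PySem.List.pyRange 0 (PySem.Str.len low) 1).foldl
    (fun acc i =>
      pvKvs.foldl
        (fun acc2 wv =>
          -- low.startswith(word, i): exact as startswith on the slice low[i:]
          if PySem.Str.startswith (PySem.Str.slice low (some i) none) wv.1 then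
            acc2 ++ [(wv.1, wv.2, i, i + PySem.Str.len wv.1)]
          else acc2)
        acc)
    []

-- ===== PRECONDITION & SPEC =====
def Spec_find_written_numbers (text : String) (out : List (String × Int × Int × Int)) : Prop := out = find_written_numbers_alt text
instance (text : String) (out : List (String × Int × Int × Int)) : Decidable (Spec_find_written_numbers text out) := by unfold Spec_find_written_numbers; infer_instance

-- ===== CLAIM (what is proved, stated in full; the proofs are below) =====
def Claim_equal_find_written_numbers : Prop := ∀ (text : String), Dom_find_written_numbers text → Spec_find_written_numbers text (find_written_numbers text)

-- ===== LEMMAS AND PROOFS =====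

-- proof-side abbreviations
def pvLow (text : String) : List Char := PySem.Chars.lower text.toList

def pvF (wv : String × Int) (i : Nat) : String × Int × Int × Int :=
  (wv.1, wv.2, (i : Int), (i : Int) + (wv.1.toList.length : Int))

-- positions ≥ k (within the lowered text) where `w` matches
def pvOcc (low w : List Char) (k : Nat) : List Nat :=
  (List.range low.length).filter (fun i => decide (k ≤ i) && w.isPrefixOf (low.drop i))

-- the order A's final sort puts the dict in
def pvKvsSorted : List (String × Int) :=
  [("three", 3), ("seven", 7), ("eight", 8), ("four", 4), ("five", 5),
   ("nine", 9), ("one", 1), ("two", 2), ("six", 6), ("ten", 10)]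

-- decidable facts about the ten literal words
theorem pvNonNil : ∀ wv ∈ pvKvs, wv.1.toList ≠ [] := by decide

theorem pvBorderFree : ∀ wv ∈ pvKvs, ∀ d < wv.1.toList.length, 1 ≤ d →
    ¬ (wv.1.toList.drop d <+: wv.1.toList) := by decide

theorem pvPrefixFree : ∀ wv1 ∈ pvKvs, ∀ wv2 ∈ pvKvs, wv1.1 ≠ wv2.1 →
    ¬ (wv1.1.toList <+: wv2.1.toList) := by decide

theorem pvKvsFstNe : List.Pairwise (fun a b => a.1 ≠ b.1) pvKvs := by decide

theorem pvKvsSortedFstNe : List.Pairwise (fun a b => a.1 ≠ b.1) pvKvsSorted := by decide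

theorem pvKvsPerm : pvKvsSorted.Perm pvKvs := by decide

-- splitting a filtered range at the first hit m, with no further hit before t
theorem pvFilterBetween (n k m t : Nat) (P : Nat → Bool) (hkm : k ≤ m) (hmt : m < t)
    (hmn : m < n) (hPm : P m = true)
    (hmin : ∀ i, k ≤ i → i < m → P i = false)
    (hgap : ∀ i, m < i → i < t → P i = false) :
    (List.range n).filter (fun i => decide (k ≤ i) && P i)
      = m :: (List.range n).filter (fun i => decide (t ≤ i) && P i) := by
  induction n with
  | zero => omega
  | succ n ih =>
    rw [List.range_succ, List.filter_append, List.filter_append]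
    by_cases hn : m < n
    · rw [ih hn]
      have hsing : ([n].filter (fun i => decide (k ≤ i) && P i))
          = ([n].filter (fun i => decide (t ≤ i) && P i)) := by
        by_cases ht : t ≤ n
        · have hkn : k ≤ n := by omega
          simp only [List.filter_cons, List.filter_nil]
          simp [hkn, ht]
        · have hPn : P n = false := hgap n (by omega) (by omega)
          simp only [List.filter_cons, List.filter_nil]
          simp [hPn]
      rw [hsing]
      simp
    · have hnm : n = m := by omega
      subst hnm
      have h1 : (List.range n).filter (fun i => decide (k ≤ i) && P i) = [] := by
        rw [List.filter_eq_nil_iff]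
        intro a ha
        simp only [List.mem_range] at ha
        by_cases hka : k ≤ a
        · simp [hka, hmin a hka ha]
        · simp [hka]
      have h2 : (List.range n).filter (fun i => decide (t ≤ i) && P i) = [] := by
        rw [List.filter_eq_nil_iff]
        intro a ha
        simp only [List.mem_range] at ha
        have hta : ¬ t ≤ a := by omega
        simp [hta]
      have htn : ¬ t ≤ n := by omega
      rw [h1, h2]
      simp [hPm, hkm, htn]

-- characterisation of A's while-loop: it emits exactly the match positions ≥ k, in order
theorem pvLoopEq (text word : String) (v : Int) (fuel : Nat) : ∀ (k : Nat)
    (acc : List (String × Int × Int × Int)),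
    k ≤ (pvLow text).length → (pvLow text).length - k < fuel →
    word.toList ≠ [] →
    (∀ d < word.toList.length, 1 ≤ d → ¬ (word.toList.drop d <+: word.toList)) →
    pvFindLoop text word v fuel (k : Int) acc
      = acc ++ (pvOcc (pvLow text) word.toList k).map (fun i => pvF (word, v) i) := by
  induction fuel with
  | zero => intro k acc hk hf hw hb; omega
  | succ fuel ih =>
    intro k acc hk hf hw hb
    have hbridge : PySem.Str.findFrom (PySem.Str.lower text) word (k : Int)
        = PySem.Chars.findFrom (pvLow text) word.toList (k : Int) := by
      rw [PySem.Str.findFrom_eq, PySem.Str.toList_lower]; rfl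
    simp only [pvFindLoop, hbridge]
    by_cases h : PySem.Chars.findFrom (pvLow text) word.toList (k : Int) = -1
    · rw [if_pos h]
      have hni : ¬ word.toList <:+: (pvLow text).drop k :=
        (PySem.Chars.findFrom_natCast_eq_neg_one_iff (pvLow text) word.toList k hk).mp h
      have hocc : pvOcc (pvLow text) word.toList k = [] := by
        unfold pvOcc
        rw [List.filter_eq_nil_iff]
        intro i hi
        simp only [Bool.and_eq_true, decide_eq_true_eq, List.isPrefixOf_iff_prefix]
        rintro ⟨hki, hpre⟩
        apply hni
        have hdd : (pvLow text).drop i = ((pvLow text).drop k).drop (i - k) := by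
          rw [List.drop_drop]
          congr 1
          omega
        rw [hdd] at hpre
        exact hpre.isInfix.trans (List.drop_suffix _ _).isInfix
      rw [hocc]
      simp
    · rw [if_neg h]
      obtain ⟨hkms, hpre, hmin⟩ :=
        PySem.Chars.findFrom_natCast_spec (pvLow text) word.toList k hk h
      set ms := PySem.Chars.findFrom (pvLow text) word.toList (k : Int) with hmsdef
      have hms0 : 0 ≤ ms := le_trans (by exact_mod_cast Int.natCast_nonneg k) hkms
      have hmsm : ms = (ms.toNat : Int) := (Int.toNat_of_nonneg hms0).symm
      set m := ms.toNat with hmdef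
      have hkm : k ≤ m := by omega
      have hw1 : 1 ≤ word.toList.length := List.length_pos_iff.mpr hw
      have hwlen : word.toList.length ≤ (pvLow text).length - m := by
        have hle := hpre.length_le
        simpa [List.length_drop] using hle
      have hmn : m < (pvLow text).length := by omega
      have hocc : pvOcc (pvLow text) word.toList k
          = m :: pvOcc (pvLow text) word.toList (m + word.toList.length) := by
        unfold pvOcc
        apply pvFilterBetween _ k m (m + word.toList.length) _ hkm (by omega) hmn
        · rw [List.isPrefixOf_iff_prefix]
          exact hpre
        · intro i hki him
          rw [Bool.eq_false_iff]
          intro hc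
          exact hmin i hki him ((List.isPrefixOf_iff_prefix).mp hc)
        · intro i hmi hit
          rw [Bool.eq_false_iff]
          intro hc
          have hpi : word.toList <+: (pvLow text).drop i := (List.isPrefixOf_iff_prefix).mp hc
          obtain ⟨r, hr⟩ := hpre
          have hdw : i - m ≤ word.toList.length := by omega
          have hdrop : (pvLow text).drop i = word.toList.drop (i - m) ++ r := by
            have h1 : (pvLow text).drop i = ((pvLow text).drop m).drop (i - m) := by
              rw [List.drop_drop]
              congr 1
              omega
            rw [h1, ← hr, List.drop_append_of_le_length hdw]
          rw [hdrop] at hpi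
          have h2 : word.toList.drop (i - m) <+: word.toList.drop (i - m) ++ r :=
            List.prefix_append _ _
          rcases List.prefix_or_prefix_of_prefix h2 hpi with hcase | hcase
          · exact hb (i - m) (by omega) (by omega) hcase
          · have hle := hcase.length_le
            simp only [List.length_drop] at hle
            omega
      have hlenw : PySem.Str.len word = (word.toList.length : Int) := PySem.Str.len_eq word
      have hcast : ms + PySem.Str.len word = ((m + word.toList.length : Nat) : Int) := by
        rw [hlenw, hmsm]
        push_cast
        ring
      rw [hcast, ih (m + word.toList.length) _ (by omega) (by omega) hw hb, hocc]
      simp [pvF]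
      exact hmsm

-- the dict plumbing of A evaluated on the literal word list
theorem pvKeysEq : PySem.Dict.keys (PySem.Dict.ofList
    (PySem.List.sorted (PySem.Dict.items (PySem.Dict.ofList pvKvs))
      (fun x => PySem.Str.len x.1) true)) = pvKvsSorted.map Prod.fst := by decide

theorem pvGetDEq : ∀ wv ∈ pvKvsSorted, PySem.Dict.getD (PySem.Dict.ofList
    (PySem.List.sorted (PySem.Dict.items (PySem.Dict.ofList pvKvs))
      (fun x => PySem.Str.len x.1) true)) wv.1 0 = wv.2 := by decide

theorem pvLowLen (text : String) : (pvLow text).length = text.toList.length := by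
  simp [pvLow, PySem.Chars.lower]

-- A's result before the final sort, as a flatMap over the length-sorted word list
theorem pvAEq (text : String) :
    find_written_numbers text
      = PySem.List.sorted
          (pvKvsSorted.flatMap (fun wv => (pvOcc (pvLow text) wv.1.toList 0).map (pvF wv)))
          (fun x => x.2.2.1) := by
  simp only [find_written_numbers]
  rw [pvKeysEq, List.foldl_map]
  congr 1
  rw [PySem.List.foldl_congr_mem _ _
      (fun acc wv => acc ++ (pvOcc (pvLow text) wv.1.toList 0).map (pvF wv)) _ ?_]
  · exact PySem.List.foldl_append_eq_flatMap _ _ _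
  · intro acc wv hwv
    rw [pvGetDEq wv hwv]
    have hwk : wv ∈ pvKvs := pvKvsPerm.mem_iff.mp hwv
    have h := pvLoopEq text wv.1 wv.2 (text.toList.length + 2) 0 acc
      (by omega) (by rw [pvLowLen]; omega)
      (pvNonNil wv hwk) (pvBorderFree wv hwk)
    simpa using h

-- B's result, as a flatMap over text positions
theorem pvBEq (text : String) :
    find_written_numbers_alt text
      = (List.range (pvLow text).length).flatMap
          (fun i => (pvKvs.filter (fun wv => wv.1.toList.isPrefixOf ((pvLow text).drop i))).map
            (fun wv => pvF wv i)) := by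
  simp only [find_written_numbers_alt]
  have hlen : PySem.Str.len (PySem.Str.lower text) = ((pvLow text).length : Int) := by
    rw [PySem.Str.len_eq, PySem.Str.toList_lower]; rfl
  rw [hlen, PySem.List.pyRange_zero_natCast, List.foldl_map]
  rw [PySem.List.foldl_congr_mem _ _
      (fun acc i => acc ++ (pvKvs.filter
          (fun wv => wv.1.toList.isPrefixOf ((pvLow text).drop i))).map (fun wv => pvF wv i)) _ ?_]
  · exact PySem.List.foldl_append_eq_flatMap _ _ _
  · intro acc i _
    have hcond : ∀ wv : String × Int,
        PySem.Str.startswith (PySem.Str.slice (PySem.Str.lower text) (some (i : Int)) none) wv.1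
          = wv.1.toList.isPrefixOf ((pvLow text).drop i) := by
      intro wv
      have hsl : (PySem.Str.slice (PySem.Str.lower text) (some (i : Int)) none).toList
          = (pvLow text).drop i := by
        show (String.ofList (PySem.Chars.slice (PySem.Str.lower text).toList
            (some (i : Int)) none)).toList = _
        rw [PySem.Str.toList_lower]
        simp [PySem.Chars.slice, PySem.List.slice_from_natCast, pvLow]
      show PySem.Chars.startswith _ _ = _
      rw [hsl, PySem.Chars.startswith.eq_1]
    have hbody : (pvKvs.foldl (fun acc2 wv =>
        if PySem.Str.startswith (PySem.Str.slice (PySem.Str.lower text) (some (i:Int)) none) wv.1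
        then acc2 ++ [(wv.1, wv.2, (i : Int), (i : Int) + PySem.Str.len wv.1)] else acc2) acc)
        = pvKvs.foldl (fun acc2 wv =>
            if wv.1.toList.isPrefixOf ((pvLow text).drop i)
            then acc2 ++ [pvF wv i] else acc2) acc := by
      apply PySem.List.foldl_congr_mem
      intro acc2 wv _
      rw [hcond wv]
      rfl
    rw [hbody, PySem.List.foldl_append_if (fun wv => wv.1.toList.isPrefixOf ((pvLow text).drop i))
      (fun wv => pvF wv i)]

-- at each position at most one word matches (no word is a prefix of another)
theorem pvAtMostOne (low : List Char) (i : Nat) :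
    (pvKvs.filter (fun wv => wv.1.toList.isPrefixOf (low.drop i))) = []
    ∨ ∃ wv, (pvKvs.filter (fun wv => wv.1.toList.isPrefixOf (low.drop i))) = [wv] := by
  cases hF : pvKvs.filter (fun wv => wv.1.toList.isPrefixOf (low.drop i)) with
  | nil => exact Or.inl rfl
  | cons x t =>
    cases t with
    | nil => exact Or.inr ⟨x, rfl⟩
    | cons y t2 =>
      exfalso
      have hpw : List.Pairwise (fun a b => a.1 ≠ b.1)
          (pvKvs.filter (fun wv => wv.1.toList.isPrefixOf (low.drop i))) :=
        pvKvsFstNe.filter _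
      rw [hF] at hpw
      have hxy : x.1 ≠ y.1 := (List.pairwise_cons.mp hpw).1 y (by simp)
      have hx : x ∈ pvKvs.filter (fun wv => wv.1.toList.isPrefixOf (low.drop i)) := by
        rw [hF]; simp
      have hy : y ∈ pvKvs.filter (fun wv => wv.1.toList.isPrefixOf (low.drop i)) := by
        rw [hF]; simp
      have hxk := (List.mem_filter.mp hx).1
      have hyk := (List.mem_filter.mp hy).1
      have hxp : x.1.toList <+: low.drop i :=
        (List.isPrefixOf_iff_prefix).mp (List.mem_filter.mp hx).2
      have hyp : y.1.toList <+: low.drop i :=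
        (List.isPrefixOf_iff_prefix).mp (List.mem_filter.mp hy).2
      rcases List.prefix_or_prefix_of_prefix hxp hyp with hcase | hcase
      · exact pvPrefixFree x hxk y hyk hxy hcase
      · exact pvPrefixFree y hyk x hxk hxy.symm hcase

theorem pvPairwiseB (low : List Char) :
    List.Pairwise (fun a b => a.2.2.1 < b.2.2.1)
      ((List.range low.length).flatMap
        (fun i => (pvKvs.filter (fun wv => wv.1.toList.isPrefixOf (low.drop i))).map
          (fun wv => pvF wv i))) := by
  rw [List.flatMap_def, List.pairwise_flatten]
  constructor
  · intro l hl
    rw [List.mem_map] at hl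
    obtain ⟨i, _, rfl⟩ := hl
    rcases pvAtMostOne low i with h | ⟨wv, h⟩ <;> rw [h] <;> simp
  · rw [List.pairwise_map]
    apply List.Pairwise.imp ?_ List.pairwise_lt_range
    intro i j hij x hx y hy
    rw [List.mem_map] at hx hy
    obtain ⟨wx, _, rfl⟩ := hx
    obtain ⟨wy, _, rfl⟩ := hy
    simp only [pvF]
    exact_mod_cast hij

theorem pvNodupA (low : List Char) :
    (pvKvsSorted.flatMap (fun wv => (pvOcc low wv.1.toList 0).map (pvF wv))).Nodup := by
  rw [List.flatMap_def]
  show List.Pairwise _ _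
  rw [List.pairwise_flatten]
  constructor
  · intro l hl
    rw [List.mem_map] at hl
    obtain ⟨wv, _, rfl⟩ := hl
    apply List.Nodup.map_on ?_ (List.nodup_range.filter _)
    intro x _ y _ hxy
    have := congrArg (fun t => t.2.2.1) hxy
    simpa [pvF] using this
  · rw [List.pairwise_map]
    apply List.Pairwise.imp ?_ pvKvsSortedFstNe
    intro a b hab x hx y hy
    rw [List.mem_map] at hx hy
    obtain ⟨i, _, rfl⟩ := hx
    obtain ⟨j, _, rfl⟩ := hy
    simp only [pvF, ne_eq, Prod.mk.injEq, not_and]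
    intro h1
    exact absurd h1 hab

theorem pvPermAB (low : List Char) :
    ((List.range low.length).flatMap
        (fun i => (pvKvs.filter (fun wv => wv.1.toList.isPrefixOf (low.drop i))).map
          (fun wv => pvF wv i))).Perm
      (pvKvsSorted.flatMap (fun wv => (pvOcc low wv.1.toList 0).map (pvF wv))) := by
  have hnodB : ((List.range low.length).flatMap
      (fun i => (pvKvs.filter (fun wv => wv.1.toList.isPrefixOf (low.drop i))).map
        (fun wv => pvF wv i))).Nodup :=
    (pvPairwiseB low).imp (fun {a b} h heq => by rw [heq] at h; exact lt_irrefl _ h)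
  rw [List.perm_ext_iff_of_nodup hnodB (pvNodupA low)]
  intro x
  simp only [List.mem_flatMap, List.mem_map, List.mem_filter, List.mem_range, pvOcc,
    Bool.and_eq_true, decide_eq_true_eq]
  constructor
  · rintro ⟨i, hi, wv, ⟨hwv, hpre⟩, rfl⟩
    exact ⟨wv, pvKvsPerm.symm.mem_iff.mp hwv, i, ⟨hi, Nat.zero_le i, hpre⟩, rfl⟩
  · rintro ⟨wv, hwv, i, ⟨hi, _, hpre⟩, rfl⟩
    exact ⟨i, hi, wv, ⟨pvKvsPerm.mem_iff.mp hwv, hpre⟩, rfl⟩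

-- ===== VERDICT (by name: the statement is the Claim_ definition above) =====
theorem find_written_numbers_spec : Claim_equal_find_written_numbers := by
  intro text _
  show find_written_numbers text = find_written_numbers_alt text
  rw [pvAEq, pvBEq]
  exact PySem.List.sorted_eq_of_perm_of_pairwise_lt _ _ _ (pvPermAB (pvLow text))
    (pvPairwiseB (pvLow text))
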